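-- pv_equiv track=rewrite | github.com/lalat18/Kraken_PythonApi | Kraken_PythonApi/Source_Control/CodeRepositoary/Plugins/InheritQafunction/Test_Trade_OHLC_cases.py | Info_Trade_Open_low_high
-- ===== SOURCE A (Python) =====
-- def Info_Trade_Open_low_high(Tradedict, key):
--     '''This function will help to gather all the Information
--     with Regards to HIGH/LOW/OPEN from both the Endpoints
--         1. Trades
--         2. OHLC
--     '''
--     Trade_Open_low_high = list()
--     for ele in (Tradedict[key]):
--         Trade_Open_low_high.append(ele[0])
--     Info_Trade_Open_Low_High = list()
--     Info_Trade_Open_Low_High.append(Trade_Open_low_high[0])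
--     Info_Trade_Open_Low_High.append(max(Trade_Open_low_high))
--     Info_Trade_Open_Low_High.append(min(Trade_Open_low_high))
--     return (Info_Trade_Open_Low_High)
-- ===== SOURCE B (Python) =====
-- def Info_Trade_Open_low_high(Tradedict, key):
--     seq = Tradedict[key]
--     first = seq[0][0]
--     hi = lo = first
--     for ele in seq[1:]:
--         v = ele[0]
--         if v > hi:
--             hi = v
--         if v < lo:
--             lo = v
--     return [first, hi, lo]
-- ===== Notes on version B (the rewrite author's own statement) =====
-- stated objective: faster
-- what changed: B replaces building an intermediate list of first fields and then making three separate passes over it (index, max, min) with one fused pass that seeds first/hi/lo from the first element and updates the running max and min in a single loop, allocating no intermediate list.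
import Mathlib
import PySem

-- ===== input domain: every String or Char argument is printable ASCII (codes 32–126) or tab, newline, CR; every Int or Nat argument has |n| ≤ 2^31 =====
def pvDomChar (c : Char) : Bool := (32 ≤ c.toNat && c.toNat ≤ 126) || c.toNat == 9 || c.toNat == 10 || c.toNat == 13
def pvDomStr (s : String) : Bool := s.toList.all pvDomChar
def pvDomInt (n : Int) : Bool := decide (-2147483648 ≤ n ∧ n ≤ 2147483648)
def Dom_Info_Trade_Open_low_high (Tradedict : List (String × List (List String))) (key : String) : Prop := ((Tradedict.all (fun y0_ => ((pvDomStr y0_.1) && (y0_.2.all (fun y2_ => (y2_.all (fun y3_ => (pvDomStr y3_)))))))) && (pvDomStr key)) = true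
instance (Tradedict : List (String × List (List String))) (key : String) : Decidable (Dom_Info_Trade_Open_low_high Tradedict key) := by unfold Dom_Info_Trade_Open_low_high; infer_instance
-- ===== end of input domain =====

-- B fuses A's four traversals (build list of first fields, then index/max/min) into one
-- pass maintaining first/hi/lo; equivalence of return values is proved on Pre_ below.

-- ===== PORT A =====
-- Tradedict[key]: first matching entry (KeyError → excluded by Pre_; default never reached inside Pre_)
def Info_Trade_Open_low_high (Tradedict : List (String × List (List String))) (key : String) : List String :=
  let rows := ((Tradedict.find? (fun p => p.1 == key)).getD (key, [])).2
  -- for ele in rows: Trade_Open_low_high.append(ele[0])   (ele[0] total inside Pre_)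
  let tolh := rows.foldl (fun acc ele => acc ++ [(PySem.List.pyGet? ele 0).getD ""]) []
  [(PySem.List.pyGet? tolh 0).getD "",
   (PySem.List.max? tolh (fun x => x)).getD "",
   (PySem.List.min? tolh (fun x => x)).getD ""]

-- ===== PORT B =====
def Info_Trade_Open_low_high_alt (Tradedict : List (String × List (List String))) (key : String) : List String :=
  let rows := ((Tradedict.find? (fun p => p.1 == key)).getD (key, [])).2
  match rows with
  | [] => []  -- unreachable inside Pre_ (A raises IndexError on an empty sequence)
  | e :: rest =>
    let first := (PySem.List.pyGet? e 0).getD ""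
    let hl := rest.foldl (fun (p : String × String) ele =>
        let v := (PySem.List.pyGet? ele 0).getD ""
        (if v > p.1 then v else p.1, if v < p.2 then v else p.2)) (first, first)
    [first, hl.1, hl.2]

-- ===== PRECONDITION & SPEC =====
-- Pre_ excludes exactly the inputs where A raises: a missing key (KeyError),
-- an empty sequence at the key (IndexError), or an empty inner element (IndexError on ele[0]).
def Pre_Info_Trade_Open_low_high (Tradedict : List (String × List (List String))) (key : String) : Prop :=
  (match Tradedict.find? (fun p => p.1 == key) with
   | none => false
   | some p => !p.2.isEmpty && p.2.all (fun ele => !ele.isEmpty)) = true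

instance (Tradedict : List (String × List (List String))) (key : String) : Decidable (Pre_Info_Trade_Open_low_high Tradedict key) := by unfold Pre_Info_Trade_Open_low_high; infer_instance

def pvWitness_Info_Trade_Open_low_high : (List (String × List (List String))) × String :=
  ([("XBT", [["50", "a"], ["7"], ["99"]])], "XBT")

def Spec_Info_Trade_Open_low_high (Tradedict : List (String × List (List String))) (key : String) (out : List String) : Prop := out = Info_Trade_Open_low_high_alt Tradedict key
instance (Tradedict : List (String × List (List String))) (key : String) (out : List String) : Decidable (Spec_Info_Trade_Open_low_high Tradedict key out) := by unfold Spec_Info_Trade_Open_low_high; infer_instance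

-- ===== CLAIM (what is proved, stated in full; the proofs are below) =====
def Claim_equal_Info_Trade_Open_low_high : Prop := ∀ (Tradedict : List (String × List (List String))) (key : String), Dom_Info_Trade_Open_low_high Tradedict key → Pre_Info_Trade_Open_low_high Tradedict key → Spec_Info_Trade_Open_low_high Tradedict key (Info_Trade_Open_low_high Tradedict key)

-- ===== LEMMAS AND PROOFS =====

-- A's append-loop builds exactly the map of first fields.
theorem pv_foldl_append_map (rows : List (List String)) (acc : List String) :
    rows.foldl (fun acc ele => acc ++ [(PySem.List.pyGet? ele 0).getD ""]) acc
      = acc ++ rows.map (fun ele => (PySem.List.pyGet? ele 0).getD "") := by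
  induction rows generalizing acc with
  | nil => simp
  | cons e t ih => simp [List.foldl, ih]

-- B's fused loop computes (running max, running min) of the first fields.
theorem pv_fused_eq_max_min (rest : List (List String)) (hi lo : String) :
    rest.foldl (fun (p : String × String) ele =>
        let v := (PySem.List.pyGet? ele 0).getD ""
        (if v > p.1 then v else p.1, if v < p.2 then v else p.2)) (hi, lo)
      = ((rest.map (fun ele => (PySem.List.pyGet? ele 0).getD "")).foldl max hi,
         (rest.map (fun ele => (PySem.List.pyGet? ele 0).getD "")).foldl min lo) := by
  induction rest generalizing hi lo with
  | nil => simp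
  | cons e t ih =>
    simp only [List.foldl, List.map]
    rw [ih]
    have hmax : ∀ a v : String, (if v > a then v else a) = max a v := by
      intro a v; rcases lt_or_ge a v with h | h
      · rw [if_pos h, max_eq_right h.le]
      · rw [if_neg (not_lt.mpr h), max_eq_left h]
    have hmin : ∀ a v : String, (if v < a then v else a) = min a v := by
      intro a v; rcases lt_or_ge v a with h | h
      · rw [if_pos h, min_eq_right h.le]
      · rw [if_neg (not_lt.mpr h), min_eq_left h]
    rw [hmax, hmin]

theorem pv_witness_ok :
    Dom_Info_Trade_Open_low_high pvWitness_Info_Trade_Open_low_high.1 pvWitness_Info_Trade_Open_low_high.2 ∧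
    Pre_Info_Trade_Open_low_high pvWitness_Info_Trade_Open_low_high.1 pvWitness_Info_Trade_Open_low_high.2 := by
  constructor <;> decide

-- ===== VERDICT (by name: the statement is the Claim_ definition above) =====
theorem Info_Trade_Open_low_high_spec : Claim_equal_Info_Trade_Open_low_high := by
  intro Tradedict key _ hpre
  unfold Spec_Info_Trade_Open_low_high Info_Trade_Open_low_high Info_Trade_Open_low_high_alt
  unfold Pre_Info_Trade_Open_low_high at hpre
  cases hfind : Tradedict.find? (fun p => p.1 == key) with
  | none => rw [hfind] at hpre; exact absurd hpre (by simp)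
  | some p =>
    rw [hfind] at hpre
    simp only [Bool.and_eq_true, Bool.not_eq_true', List.isEmpty_eq_false_iff] at hpre
    obtain ⟨hne, _⟩ := hpre
    simp only [Option.getD_some]
    cases hrows : p.2 with
    | nil => exact absurd hrows hne
    | cons e rest =>
      simp only [pv_foldl_append_map, List.nil_append, List.map]
      rw [pv_fused_eq_max_min]
      simp [PySem.List.pyGet?, PySem.List.pyIdx?, PySem.List.max?_id_cons, PySem.List.min?_id_cons]
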